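-- pv_equiv track=rewrite | github.com/mortyc126-debug/rayon | src/xor_hard_instance.py | memoized_sat
-- ===== SOURCE A (Python) =====
-- def simplify_circuit(gates, n, fixed_vars):
--     wire_val = dict(fixed_vars)
--     sig = []
--     for gtype, inp1, inp2, out in gates:
--         v1 = wire_val.get(inp1)
--         v2 = wire_val.get(inp2) if inp2 >= 0 else None
--         if gtype == 'AND':
--             if v1 == 0 or v2 == 0: wire_val[out] = 0; sig.append(0)
--             elif v1 == 1 and v2 == 1: wire_val[out] = 1; sig.append(1)
--             elif v1 == 1: wire_val[out] = v2; sig.append(2)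
--             elif v2 == 1: wire_val[out] = v1; sig.append(3)
--             else: sig.append(4)
--         elif gtype == 'OR':
--             if v1 == 1 or v2 == 1: wire_val[out] = 1; sig.append(5)
--             elif v1 == 0 and v2 == 0: wire_val[out] = 0; sig.append(6)
--             elif v1 == 0: wire_val[out] = v2; sig.append(7)
--             elif v2 == 0: wire_val[out] = v1; sig.append(8)
--             else: sig.append(9)
--         elif gtype == 'NOT':
--             if v1 == 0: wire_val[out] = 1; sig.append(10)
--             elif v1 == 1: wire_val[out] = 0; sig.append(11)
--             else: sig.append(12)
--     return tuple(sig), wire_val.get(gates[-1][3]) if gates else None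
--
-- def memoized_sat(gates, n, fixed_vars=None, memo=None):
--     if fixed_vars is None: fixed_vars = {}
--     if memo is None: memo = {}
--     sig, out = simplify_circuit(gates, n, fixed_vars)
--     if sig in memo: return memo[sig], len(memo)
--     if out == 1: memo[sig] = True; return True, len(memo)
--     if out == 0: memo[sig] = False; return False, len(memo)
--     unfixed = [i for i in range(n) if i not in fixed_vars]
--     if not unfixed: memo[sig] = False; return False, len(memo)
--     var = unfixed[0]
--     fixed_vars[var] = 1
--     r1, _ = memoized_sat(gates, n, fixed_vars, memo)
--     if r1: del fixed_vars[var]; memo[sig] = True; return True, len(memo)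
--     fixed_vars[var] = 0
--     r0, _ = memoized_sat(gates, n, fixed_vars, memo)
--     del fixed_vars[var]; memo[sig] = r0; return r0, len(memo)
-- ===== SOURCE B (Python) =====
-- # Same return values as A; mutates the passed-in fixed_vars/memo dicts like A does.
-- # B: explicit-stack iterative DFS instead of recursion, and a table-driven per-gate
-- # step function instead of A's inline branch cascade inside the simplifier loop.
--
-- _SKIP = object()  # sentinel: the gate leaves its output wire untouched
--
--
-- def _gate_step(gtype, v1, v2):
--     """Return (sig code, value to assign or _SKIP), or None for an unknown gate type."""
--     if gtype == 'AND':
--         if v1 == 0 or v2 == 0: return 0, 0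
--         if v1 == 1 and v2 == 1: return 1, 1
--         if v1 == 1: return 2, v2
--         if v2 == 1: return 3, v1
--         return 4, _SKIP
--     if gtype == 'OR':
--         if v1 == 1 or v2 == 1: return 5, 1
--         if v1 == 0 and v2 == 0: return 6, 0
--         if v1 == 0: return 7, v2
--         if v2 == 0: return 8, v1
--         return 9, _SKIP
--     if gtype == 'NOT':
--         if v1 == 0: return 10, 1
--         if v1 == 1: return 11, 0
--         return 12, _SKIP
--     return None
--
--
-- def _simplify(gates, fixed):
--     wv = dict(fixed)
--     sig = []
--     for gtype, a, b, out in gates: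
--         step = _gate_step(gtype, wv.get(a), wv.get(b) if b >= 0 else None)
--         if step is None:
--             continue
--         code, val = step
--         sig.append(code)
--         if val is not _SKIP:
--             wv[out] = val
--     return tuple(sig), (wv.get(gates[-1][3]) if gates else None)
--
--
-- def memoized_sat(gates, n, fixed_vars=None, memo=None):
--     fixed = {} if fixed_vars is None else fixed_vars
--     table = {} if memo is None else memo
--     stack = []  # frames (sig, var, bit): waiting for the bit-branch of var
--     while True:
--         # enter the node described by the current `fixed`
--         sig, out = _simplify(gates, fixed)
--         if sig in table:
--             result = table[sig]
--         elif out == 1 or out == 0: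
--             result = (out == 1)
--             table[sig] = result
--         else:
--             var = next((i for i in range(n) if i not in fixed), None)
--             if var is None:
--                 result = False
--                 table[sig] = False
--             else:
--                 fixed[var] = 1
--                 stack.append((sig, var, 1))
--                 continue
--         # unwind: propagate `result` up through the stack
--         while stack:
--             sig, var, bit = stack.pop()
--             if bit == 1 and not result:
--                 fixed[var] = 0
--                 stack.append((sig, var, 0))
--                 break
--             del fixed[var]
--             table[sig] = result
--         else:
--             return result, len(table)
-- ===== Notes on version B (the rewrite author's own statement) =====
-- stated objective: alternative
-- what changed: memoized_sat is re-implemented as an iterative explicit-stack DFS (a while-loop over frames (sig, var, bit) with a separate unwind phase propagating results) instead of A's recursion, the branch variable is found with a short-circuiting generator instead of building the full unfixed list, and the simplifier's inline branch cascade is factored into a pure table-driven per-gate step function feeding a single assignment point.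
import Mathlib
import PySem

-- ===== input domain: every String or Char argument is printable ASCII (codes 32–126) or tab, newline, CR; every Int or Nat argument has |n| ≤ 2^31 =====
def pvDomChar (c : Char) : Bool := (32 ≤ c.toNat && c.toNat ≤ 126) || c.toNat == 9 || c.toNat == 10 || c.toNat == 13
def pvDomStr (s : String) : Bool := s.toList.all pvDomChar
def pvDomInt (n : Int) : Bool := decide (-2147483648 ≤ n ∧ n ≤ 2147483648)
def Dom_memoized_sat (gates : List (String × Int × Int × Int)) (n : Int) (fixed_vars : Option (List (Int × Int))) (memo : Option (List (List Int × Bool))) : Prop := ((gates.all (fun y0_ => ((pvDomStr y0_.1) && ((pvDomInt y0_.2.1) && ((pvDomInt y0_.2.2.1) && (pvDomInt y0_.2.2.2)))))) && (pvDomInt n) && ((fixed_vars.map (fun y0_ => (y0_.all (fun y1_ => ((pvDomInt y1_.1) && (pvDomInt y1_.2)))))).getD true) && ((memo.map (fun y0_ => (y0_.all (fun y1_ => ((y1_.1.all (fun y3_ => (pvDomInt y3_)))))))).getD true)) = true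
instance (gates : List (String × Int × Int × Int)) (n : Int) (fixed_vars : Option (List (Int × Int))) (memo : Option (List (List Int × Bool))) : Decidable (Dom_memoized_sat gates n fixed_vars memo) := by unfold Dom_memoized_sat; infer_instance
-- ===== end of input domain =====

-- B replaces A's recursive branch-and-memoize solver by an explicit-stack iterative DFS with a
-- table-driven per-gate step function (same results); both A and B mutate the passed-in
-- fixed_vars/memo dicts identically, the equivalence proved here is about the RETURN value.

-- ===== PORT A =====

def simplifyCircuit (gates : List (String × Int × Int × Int)) (_n : Int)
    (fixed : PySem.Dict Int Int) : List Int × Option Int :=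
  let wv0 : PySem.Dict Int (Option Int) := PySem.Dict.mk (fixed.items.map (fun p => (p.1, some p.2)))
  let st := gates.foldl (fun (st : PySem.Dict Int (Option Int) × List Int) g =>
    let wv := st.1
    let sig := st.2
    let gtype := g.1
    let inp1 := g.2.1
    let inp2 := g.2.2.1
    let out := g.2.2.2
    let v1 : Option Int := (wv.get? inp1).getD none
    let v2 : Option Int := if inp2 ≥ 0 then (wv.get? inp2).getD none else none
    if gtype == "AND" then
      if v1 == some 0 || v2 == some 0 then (wv.insert out (some 0), sig ++ [0])
      else if v1 == some 1 && v2 == some 1 then (wv.insert out (some 1), sig ++ [1])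
      else if v1 == some 1 then (wv.insert out v2, sig ++ [2])
      else if v2 == some 1 then (wv.insert out v1, sig ++ [3])
      else (wv, sig ++ [4])
    else if gtype == "OR" then
      if v1 == some 1 || v2 == some 1 then (wv.insert out (some 1), sig ++ [5])
      else if v1 == some 0 && v2 == some 0 then (wv.insert out (some 0), sig ++ [6])
      else if v1 == some 0 then (wv.insert out v2, sig ++ [7])
      else if v2 == some 0 then (wv.insert out v1, sig ++ [8])
      else (wv, sig ++ [9])
    else if gtype == "NOT" then
      if v1 == some 0 then (wv.insert out (some 1), sig ++ [10])
      else if v1 == some 1 then (wv.insert out (some 0), sig ++ [11])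
      else (wv, sig ++ [12])
    else (wv, sig)) (wv0, [])
  (st.2, match PySem.List.pyGet? gates (-1) with
         | some g => (st.1.get? g.2.2.2).getD none
         | none => none)

-- unfixed = [i for i in range(n) if i not in fixed_vars]
def msatUnfixed (n : Int) (fixed : PySem.Dict Int Int) : List Int :=
  (PySem.List.pyRange 0 n 1).filter (fun i => !(fixed.contains i))

-- termination helpers: counting via countP
lemma pvCountP_le {l : List Int} {p q : Int → Bool} (h : ∀ x ∈ l, p x = true → q x = true) :
    l.countP p ≤ l.countP q := by
  induction l with
  | nil => simp
  | cons b t ih =>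
    have ht := ih (fun x hx hpx => h x (List.mem_cons_of_mem _ hx) hpx)
    simp only [List.countP_cons]
    by_cases hp : p b = true
    · rw [if_pos hp, if_pos (h b List.mem_cons_self hp)]
      omega
    · rw [if_neg hp]
      by_cases hq : q b = true
      · rw [if_pos hq]; omega
      · rw [if_neg hq]; omega

lemma pvCountP_lt {l : List Int} {p q : Int → Bool} (h : ∀ x ∈ l, p x = true → q x = true)
    {a : Int} (ha : a ∈ l) (hqa : q a = true) (hpa : p a = false) :
    l.countP p < l.countP q := by
  induction l with
  | nil => cases ha
  | cons b t ih =>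
    simp only [List.countP_cons]
    have hle : t.countP p ≤ t.countP q :=
      pvCountP_le (fun x hx => h x (List.mem_cons_of_mem _ hx))
    rcases List.mem_cons.mp ha with rfl | hat
    · rw [if_neg (by simp [hpa]), if_pos hqa]
      omega
    · have hlt := ih (fun x hx => h x (List.mem_cons_of_mem _ hx)) hat
      by_cases hp : p b = true
      · rw [if_pos hp, if_pos (h b List.mem_cons_self hp)]
        omega
      · rw [if_neg hp]
        by_cases hq : q b = true
        · rw [if_pos hq]; omega
        · rw [if_neg hq]; omega

lemma pvCountP_le_succ {l : List Int} {p q : Int → Bool} {k : Int}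
    (h : ∀ x, x ≠ k → p x = q x) (hn : l.Nodup) : l.countP p ≤ l.countP q + 1 := by
  induction l with
  | nil => simp
  | cons b t ih =>
    have hn' : t.Nodup := (List.nodup_cons.mp hn).2
    have hbt : b ∉ t := (List.nodup_cons.mp hn).1
    simp only [List.countP_cons]
    rcases eq_or_ne b k with rfl | hbk
    · have heq : t.countP p = t.countP q := by
        apply List.countP_congr
        intro x hx
        rw [h x (fun hxe => hbt (hxe ▸ hx))]
      by_cases hp : p b = true
      · rw [if_pos hp]
        by_cases hq : q b = true
        · rw [if_pos hq]; omega
        · rw [if_neg hq]; omega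
      · rw [if_neg hp]
        by_cases hq : q b = true
        · rw [if_pos hq]; omega
        · rw [if_neg hq]; omega
    · have hpb : p b = q b := h b hbk
      have ht := ih hn'
      by_cases hp : p b = true
      · rw [if_pos hp, if_pos (by rw [← hpb]; exact hp)]
        omega
      · rw [if_neg hp, if_neg (fun hq => hp (by rw [hpb]; exact hq))]
        omega

lemma pvContains_erase_of_ne (d : PySem.Dict Int Int) (k i : Int) (h : i ≠ k) :
    (d.erase k).contains i = d.contains i := by
  unfold PySem.Dict.erase PySem.Dict.contains
  rw [Bool.eq_iff_iff]
  simp only [List.any_eq_true, List.mem_filter]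
  constructor
  · rintro ⟨p, ⟨hp, _⟩, hpi⟩
    exact ⟨p, hp, hpi⟩
  · rintro ⟨p, hp, hpi⟩
    refine ⟨p, ⟨hp, ?_⟩, hpi⟩
    have : p.1 = i := by simpa using hpi
    simp [this, h]

lemma msatUnfixed_insert_lt (n : Int) (fixed : PySem.Dict Int Int) (var v : Int)
    (hmem : var ∈ PySem.List.pyRange 0 n 1) (hc : fixed.contains var = false) :
    (msatUnfixed n (fixed.insert var v)).length < (msatUnfixed n fixed).length := by
  unfold msatUnfixed
  rw [← List.countP_eq_length_filter, ← List.countP_eq_length_filter]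
  refine pvCountP_lt ?_ hmem (by simp [hc]) ?_
  · intro x _ hx
    rw [Bool.not_eq_true'] at hx ⊢
    rw [PySem.Dict.contains_insert] at hx
    cases hcx : fixed.contains x
    · rfl
    · simp [hcx] at hx
  · simp

lemma msatUnfixed_insert_le (n : Int) (fixed : PySem.Dict Int Int) (k v : Int) :
    (msatUnfixed n (fixed.insert k v)).length ≤ (msatUnfixed n fixed).length := by
  unfold msatUnfixed
  rw [← List.countP_eq_length_filter, ← List.countP_eq_length_filter]
  apply pvCountP_le
  intro x _ hx
  rw [Bool.not_eq_true'] at hx ⊢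
  rw [PySem.Dict.contains_insert] at hx
  cases hcx : fixed.contains x
  · rfl
  · simp [hcx] at hx

lemma msatUnfixed_erase_le (n : Int) (fixed : PySem.Dict Int Int) (k : Int) :
    (msatUnfixed n (fixed.erase k)).length ≤ (msatUnfixed n fixed).length + 1 := by
  unfold msatUnfixed
  rw [← List.countP_eq_length_filter, ← List.countP_eq_length_filter]
  apply pvCountP_le_succ (k := k)
  · intro x hx
    rw [pvContains_erase_of_ne fixed k x hx]
  · exact PySem.List.nodup_pyRange_one 0 n

def msatGo (gates : List (String × Int × Int × Int)) (n : Int)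
    (fixed : PySem.Dict Int Int) (memo : PySem.Dict (List Int) Bool) :
    (Bool × Int) × PySem.Dict (List Int) Bool :=
  let sc := simplifyCircuit gates n fixed
  let sig := sc.1
  let out := sc.2
  match memo.get? sig with
  | some b => ((b, (memo.size : Int)), memo)
  | none =>
    if out == some 1 then
      let m := memo.insert sig true; ((true, (m.size : Int)), m)
    else if out == some 0 then
      let m := memo.insert sig false; ((false, (m.size : Int)), m)
    else
      match h : msatUnfixed n fixed with
      | [] => let m := memo.insert sig false; ((false, (m.size : Int)), m)
      | var :: _ =>
        let r1 := msatGo gates n (fixed.insert var 1) memo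
        if r1.1.1 then
          let m := r1.2.insert sig true; ((true, (m.size : Int)), m)
        else
          let r0 := msatGo gates n (fixed.insert var 0) r1.2
          let m := r0.2.insert sig r0.1.1; ((r0.1.1, (m.size : Int)), m)
termination_by (msatUnfixed n fixed).length
decreasing_by
  all_goals
    have hmem : var ∈ msatUnfixed n fixed := h ▸ List.mem_cons_self
    have hmem' := List.mem_filter.mp hmem
    exact msatUnfixed_insert_lt n fixed var _ hmem'.1 (by simpa using hmem'.2)

def memoized_sat (gates : List (String × Int × Int × Int)) (n : Int) (fixed_vars : Option (List (Int × Int))) (memo : Option (List (List Int × Bool))) : Bool × Int :=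
  let fixed0 : PySem.Dict Int Int :=
    match fixed_vars with | none => PySem.Dict.empty | some l => PySem.Dict.ofList l
  let memo0 : PySem.Dict (List Int) Bool :=
    match memo with | none => PySem.Dict.empty | some l => PySem.Dict.ofList l
  (msatGo gates n fixed0 memo0).1

-- ===== PORT B =====

-- per-gate step of B's simplifier (Source B _gate_step): the sig code and the assignment to the
-- output wire ('none' in the second slot = _SKIP, leave the wire), or 'none' for an unknown gate
def altGateStep (gtype : String) (v1 v2 : Option Int) : Option (Int × Option (Option Int)) :=
  if gtype == "AND" then
    if v1 == some 0 || v2 == some 0 then some (0, some (some 0))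
    else if v1 == some 1 && v2 == some 1 then some (1, some (some 1))
    else if v1 == some 1 then some (2, some v2)
    else if v2 == some 1 then some (3, some v1)
    else some (4, none)
  else if gtype == "OR" then
    if v1 == some 1 || v2 == some 1 then some (5, some (some 1))
    else if v1 == some 0 && v2 == some 0 then some (6, some (some 0))
    else if v1 == some 0 then some (7, some v2)
    else if v2 == some 0 then some (8, some v1)
    else some (9, none)
  else if gtype == "NOT" then
    if v1 == some 0 then some (10, some (some 1))
    else if v1 == some 1 then some (11, some (some 0))
    else some (12, none)
  else none

-- Source B _simplify's loop as structural recursion over the gate list, building sig front-to-back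
def altSimpRec (wv : PySem.Dict Int (Option Int)) :
    List (String × Int × Int × Int) → List Int × PySem.Dict Int (Option Int)
  | [] => ([], wv)
  | (gt, a, b, o) :: rest =>
    match altGateStep gt ((wv.get? a).getD none)
        (if b ≥ 0 then (wv.get? b).getD none else none) with
    | none => altSimpRec wv rest
    | some (code, asg) =>
      let wv' := match asg with | none => wv | some v => wv.insert o v
      let r := altSimpRec wv' rest
      (code :: r.1, r.2)

def altSimp (gates : List (String × Int × Int × Int)) (_n : Int)
    (fixed : PySem.Dict Int Int) : List Int × Option Int :=
  let r := altSimpRec (PySem.Dict.mk (fixed.items.map (fun p => (p.1, some p.2)))) gates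
  (r.1, match gates.getLast? with
        | some g => (r.2.get? g.2.2.2).getD none
        | none => none)

-- number of still-unfixed variables (B's termination measure)
def altFree (n : Int) (fixed : PySem.Dict Int Int) : Nat :=
  (PySem.List.pyRange 0 n 1).countP (fun i => !(fixed.contains i))

lemma altFree_eq (n : Int) (fixed : PySem.Dict Int Int) :
    altFree n fixed = (msatUnfixed n fixed).length := by
  rw [altFree, msatUnfixed, List.countP_eq_length_filter]

-- potential of the pending-frame stack, for termination of the iterative DFS
def altRpot : List (List Int × Int × Int) → Nat → Nat
  | [], _ => 0
  | (_, _, b) :: st, u => (if b == 1 then 5 ^ u + 2 else 1) + altRpot st (u + 1)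

lemma altRpot_mono (st : List (List Int × Int × Int)) {u u' : Nat} (h : u ≤ u') :
    altRpot st u ≤ altRpot st u' := by
  induction st generalizing u u' with
  | nil => simp [altRpot]
  | cons f t ih =>
    obtain ⟨sig, var, b⟩ := f
    simp only [altRpot]
    have h1 : altRpot t (u + 1) ≤ altRpot t (u' + 1) := ih (by omega)
    have h2 : (5:Nat) ^ u ≤ 5 ^ u' := Nat.pow_le_pow_right (by norm_num) h
    split <;> omega

mutual
def altEnter (gates : List (String × Int × Int × Int)) (n : Int)
    (fixed : PySem.Dict Int Int) (memo : PySem.Dict (List Int) Bool)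
    (stack : List (List Int × Int × Int)) : Bool × PySem.Dict (List Int) Bool :=
  let sc := altSimp gates n fixed
  let sig := sc.1
  let out := sc.2
  match memo.get? sig with
  | some b => altUnwind gates n b fixed memo stack
  | none =>
    if out == some 1 || out == some 0 then
      let r := out == some 1
      altUnwind gates n r fixed (memo.insert sig r) stack
    else
      match h : (PySem.List.pyRange 0 n 1).find? (fun i => !(fixed.contains i)) with
      | none => altUnwind gates n false fixed (memo.insert sig false) stack
      | some var => altEnter gates n (fixed.insert var 1) memo ((sig, var, 1) :: stack)
termination_by 5 ^ altFree n fixed + altRpot stack (altFree n fixed)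
decreasing_by
  · have h5 : 0 < (5:Nat) ^ altFree n fixed := pow_pos (by norm_num) _
    omega
  · have h5 : 0 < (5:Nat) ^ altFree n fixed := pow_pos (by norm_num) _
    omega
  · have h5 : 0 < (5:Nat) ^ altFree n fixed := pow_pos (by norm_num) _
    omega
  · -- push: strictly fewer unfixed vars below
    simp only [altFree_eq]
    have hp := List.find?_some h
    have hmem := List.mem_of_find?_eq_some h
    have hlt : (msatUnfixed n (fixed.insert var 1)).length < (msatUnfixed n fixed).length :=
      msatUnfixed_insert_lt n fixed var 1 hmem (by simpa using hp)
    set u' := (msatUnfixed n (fixed.insert var 1)).length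
    set u := (msatUnfixed n fixed).length
    simp only [altRpot]
    have hmono : altRpot stack (u' + 1) ≤ altRpot stack u := altRpot_mono stack (by omega)
    have hpow : (5:Nat) ^ u' ≤ 5 ^ (u - 1) := Nat.pow_le_pow_right (by norm_num) (by omega)
    have hpow2 : (5:Nat) ^ u = 5 * 5 ^ (u - 1) := by
      rw [← pow_succ']
      congr 1
      omega
    have h5 : 0 < (5:Nat) ^ (u - 1) := pow_pos (by norm_num) _
    simp only [show ((1:Int) == 1) = true by decide, if_true]
    omega

def altUnwind (gates : List (String × Int × Int × Int)) (n : Int) (result : Bool)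
    (fixed : PySem.Dict Int Int) (memo : PySem.Dict (List Int) Bool)
    (stack : List (List Int × Int × Int)) : Bool × PySem.Dict (List Int) Bool :=
  match stack with
  | [] => (result, memo)
  | (sig, var, bit) :: st =>
    if bit == 1 && !result then
      altEnter gates n (fixed.insert var 0) memo ((sig, var, 0) :: st)
    else
      altUnwind gates n result (fixed.erase var) (memo.insert sig result) st
termination_by altRpot stack (altFree n fixed)
decreasing_by
  · -- switch to the 0-branch
    simp only [altFree_eq]
    set u' := (msatUnfixed n (fixed.insert var 0)).length
    set u := (msatUnfixed n fixed).length
    have hle : u' ≤ u := msatUnfixed_insert_le n fixed var 0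
    simp only [altRpot]
    have hmono : altRpot st (u' + 1) ≤ altRpot st (u + 1) := altRpot_mono st (by omega)
    have hpow : (5:Nat) ^ u' ≤ 5 ^ u := Nat.pow_le_pow_right (by norm_num) hle
    have hb : (bit == 1) = true := by simp_all
    simp only [hb, show ((0:Int) == 1) = false by decide, Bool.false_eq_true, if_false, if_true]
    have h5 : 0 < (5:Nat) ^ u := pow_pos (by norm_num) u
    omega
  · -- pop a frame
    simp only [altFree_eq]
    set u' := (msatUnfixed n (fixed.erase var)).length
    set u := (msatUnfixed n fixed).length
    have hle : u' ≤ u + 1 := msatUnfixed_erase_le n fixed var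
    have hmono : altRpot st u' ≤ altRpot st (u + 1) := altRpot_mono st hle
    simp only [altRpot]
    have h5 : 0 < (5:Nat) ^ u := pow_pos (by norm_num) u
    split <;> omega
end

def memoized_sat_alt (gates : List (String × Int × Int × Int)) (n : Int) (fixed_vars : Option (List (Int × Int))) (memo : Option (List (List Int × Bool))) : Bool × Int :=
  let r := altEnter gates n (PySem.Dict.ofList (fixed_vars.getD []))
    (PySem.Dict.ofList (memo.getD [])) []
  (r.1, (r.2.size : Int))

-- ===== PRECONDITION & SPEC =====
def Spec_memoized_sat (gates : List (String × Int × Int × Int)) (n : Int) (fixed_vars : Option (List (Int × Int))) (memo : Option (List (List Int × Bool))) (out : Bool × Int) : Prop := out = memoized_sat_alt gates n fixed_vars memo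
instance (gates : List (String × Int × Int × Int)) (n : Int) (fixed_vars : Option (List (Int × Int))) (memo : Option (List (List Int × Bool))) (out : Bool × Int) : Decidable (Spec_memoized_sat gates n fixed_vars memo out) := by unfold Spec_memoized_sat; infer_instance

-- ===== CLAIM (what is proved, stated in full; the proofs are below) =====
def Claim_equal_memoized_sat : Prop := ∀ (gates : List (String × Int × Int × Int)) (n : Int) (fixed_vars : Option (List (Int × Int))) (memo : Option (List (List Int × Bool))), Dom_memoized_sat gates n fixed_vars memo → Spec_memoized_sat gates n fixed_vars memo (memoized_sat gates n fixed_vars memo)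

-- ===== LEMMAS AND PROOFS =====

-- A's per-gate fold step, named so it can be reasoned about (definitionally the lambda in simplifyCircuit)
def aStep (st : PySem.Dict Int (Option Int) × List Int) (g : String × Int × Int × Int) :
    PySem.Dict Int (Option Int) × List Int :=
  let wv := st.1
  let sig := st.2
  let gtype := g.1
  let inp1 := g.2.1
  let inp2 := g.2.2.1
  let out := g.2.2.2
  let v1 : Option Int := (wv.get? inp1).getD none
  let v2 : Option Int := if inp2 ≥ 0 then (wv.get? inp2).getD none else none
  if gtype == "AND" then
    if v1 == some 0 || v2 == some 0 then (wv.insert out (some 0), sig ++ [0])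
    else if v1 == some 1 && v2 == some 1 then (wv.insert out (some 1), sig ++ [1])
    else if v1 == some 1 then (wv.insert out v2, sig ++ [2])
    else if v2 == some 1 then (wv.insert out v1, sig ++ [3])
    else (wv, sig ++ [4])
  else if gtype == "OR" then
    if v1 == some 1 || v2 == some 1 then (wv.insert out (some 1), sig ++ [5])
    else if v1 == some 0 && v2 == some 0 then (wv.insert out (some 0), sig ++ [6])
    else if v1 == some 0 then (wv.insert out v2, sig ++ [7])
    else if v2 == some 0 then (wv.insert out v1, sig ++ [8])
    else (wv, sig ++ [9])
  else if gtype == "NOT" then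
    if v1 == some 0 then (wv.insert out (some 1), sig ++ [10])
    else if v1 == some 1 then (wv.insert out (some 0), sig ++ [11])
    else (wv, sig ++ [12])
  else (wv, sig)

lemma simplifyCircuit_as_aStep (gates : List (String × Int × Int × Int)) (n : Int)
    (fixed : PySem.Dict Int Int) :
    simplifyCircuit gates n fixed =
      (let st := gates.foldl aStep
        (PySem.Dict.mk (fixed.items.map (fun p => (p.1, some p.2))), []);
       (st.2, match PySem.List.pyGet? gates (-1) with
              | some g => (st.1.get? g.2.2.2).getD none
              | none => none)) := rfl

lemma foldl_aStep_eq_altSimpRec (gates : List (String × Int × Int × Int)) :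
    ∀ (wv : PySem.Dict Int (Option Int)) (acc : List Int),
      gates.foldl aStep (wv, acc) = ((altSimpRec wv gates).2, acc ++ (altSimpRec wv gates).1) := by
  induction gates with
  | nil => intro wv acc; simp [altSimpRec]
  | cons g rest ih =>
    intro wv acc
    obtain ⟨gt, a, b, o⟩ := g
    simp only [List.foldl_cons, aStep, altSimpRec, altGateStep]
    split_ifs <;> simp [ih]

lemma pyGet_neg_one_eq_getLast (xs : List (String × Int × Int × Int)) :
    PySem.List.pyGet? xs (-1) = xs.getLast? := by
  cases xs with
  | nil => rfl
  | cons a t => simp [PySem.List.pyGet?, PySem.List.pyIdx?, List.getLast?_eq_getElem?]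

lemma altSimp_eq (gates : List (String × Int × Int × Int)) (n : Int)
    (fixed : PySem.Dict Int Int) :
    altSimp gates n fixed = simplifyCircuit gates n fixed := by
  rw [simplifyCircuit_as_aStep]
  simp only [foldl_aStep_eq_altSimpRec, pyGet_neg_one_eq_getLast, altSimp, List.nil_append]

lemma pvErase_insert_fresh (d : PySem.Dict Int Int) (k v : Int) (h : d.contains k = false) :
    (d.insert k v).erase k = d := by
  have hall : ∀ p ∈ d.items, (p.1 == k) = false := by
    simpa [PySem.Dict.contains, List.any_eq_false] using h
  apply PySem.Dict.ext
  simp only [PySem.Dict.erase, PySem.Dict.items_insert_of_not_contains d _ h, List.filter_append]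
  rw [List.filter_eq_self.mpr (fun p hp => by simp [hall p hp])]
  simp

lemma pvInsert_insert_fresh (d : PySem.Dict Int Int) (k a b : Int) (h : d.contains k = false) :
    (d.insert k a).insert k b = d.insert k b := by
  have hall : ∀ p ∈ d.items, (p.1 == k) = false := by
    simpa [PySem.Dict.contains, List.any_eq_false] using h
  apply PySem.Dict.ext
  rw [PySem.Dict.items_insert_of_contains _ b (PySem.Dict.contains_insert_self d k a),
    PySem.Dict.items_insert_of_not_contains d _ h, PySem.Dict.items_insert_of_not_contains d _ h]
  rw [List.map_append]
  rw [List.map_congr_left (fun p hp => if_neg (by simp [hall p hp]))]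
  simp

lemma altEnter_eq_unwind (gates : List (String × Int × Int × Int)) (n : Int) :
    ∀ (u : Nat) (fixed : PySem.Dict Int Int) (memo : PySem.Dict (List Int) Bool)
      (stack : List (List Int × Int × Int)), (msatUnfixed n fixed).length = u →
      altEnter gates n fixed memo stack =
        altUnwind gates n (msatGo gates n fixed memo).1.1 fixed (msatGo gates n fixed memo).2 stack := by
  intro u
  induction u using Nat.strong_induction_on with
  | _ u IH =>
  intro fixed memo stack hu
  rw [altEnter, msatGo]
  simp only [altSimp_eq]
  cases hm : memo.get? (simplifyCircuit gates n fixed).1 with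
  | some b => rfl
  | none =>
    by_cases h1 : ((simplifyCircuit gates n fixed).2 == some 1) = true
    · simp only [h1, Bool.true_or, if_true]
    · have h1' : ((simplifyCircuit gates n fixed).2 == some 1) = false := by
        revert h1; cases ((simplifyCircuit gates n fixed).2 == some 1) <;> simp
      by_cases h0 : ((simplifyCircuit gates n fixed).2 == some 0) = true
      · simp only [h1', h0, Bool.false_or, if_true, Bool.false_eq_true, if_false]
      · have h0' : ((simplifyCircuit gates n fixed).2 == some 0) = false := by
          revert h0; cases ((simplifyCircuit gates n fixed).2 == some 0) <;> simp
        simp only [h1', h0', Bool.false_or, Bool.false_eq_true, if_false]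
        have hlink : List.find? (fun i => !fixed.contains i) (PySem.List.pyRange 0 n 1)
            = (msatUnfixed n fixed).head? := by
          rw [msatUnfixed, List.head?_filter]
        split
        · rename_i hfindeq
          rw [hfindeq] at hlink
          split
          · rfl
          · rename_i var rest hun
            rw [hun] at hlink
            cases hlink
        · rename_i var hfindeq
          rw [hfindeq] at hlink
          split
          · rename_i hun
            rw [hun] at hlink
            cases hlink
          · rename_i var' rest hun
            rw [hun, List.head?_cons] at hlink
            injection hlink with hvv
            subst hvv
            have hvarmem : var ∈ msatUnfixed n fixed := hun ▸ List.mem_cons_self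
            have hvf := List.mem_filter.mp hvarmem
            have hvar : fixed.contains var = false := by
              have := hvf.2; revert this; cases fixed.contains var <;> simp
            have hmem : var ∈ PySem.List.pyRange 0 n 1 := hvf.1
            have hlt1 : (msatUnfixed n (fixed.insert var 1)).length < u :=
              hu ▸ msatUnfixed_insert_lt n fixed var 1 hmem hvar
            have hlt0 : (msatUnfixed n (fixed.insert var 0)).length < u :=
              hu ▸ msatUnfixed_insert_lt n fixed var 0 hmem hvar
            rw [IH _ hlt1 (fixed.insert var 1) memo
                (((simplifyCircuit gates n fixed).1, var, 1) :: stack) rfl]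
            rw [altUnwind]
            cases hr1 : (msatGo gates n (fixed.insert var 1) memo).1.1 with
            | true =>
              simp only [Bool.not_true, Bool.and_false, Bool.false_eq_true, if_false, if_true]
              rw [pvErase_insert_fresh fixed var 1 hvar]
            | false =>
              simp only [Bool.not_false, Bool.and_true, show ((1:Int) == 1) = true by decide,
                Bool.false_eq_true, if_false, if_true]
              rw [pvInsert_insert_fresh fixed var 1 0 hvar]
              rw [IH _ hlt0 (fixed.insert var 0) (msatGo gates n (fixed.insert var 1) memo).2
                  (((simplifyCircuit gates n fixed).1, var, 0) :: stack) rfl]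
              rw [altUnwind]
              simp only [show ((0:Int) == 1) = false by decide, Bool.false_and, Bool.false_eq_true,
                if_false]
              rw [pvErase_insert_fresh fixed var 0 hvar]

lemma msatGo_len (gates : List (String × Int × Int × Int)) (n : Int)
    (fixed : PySem.Dict Int Int) (memo : PySem.Dict (List Int) Bool) :
    (msatGo gates n fixed memo).1.2 = ((msatGo gates n fixed memo).2.size : Int) := by
  rw [msatGo]
  split
  · rfl
  · split
    · rfl
    · split
      · rfl
      · split
        · rfl
        · rename_i var tail heq
          cases hb : (msatGo gates n (fixed.insert var 1) memo).1.1 <;>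
            simp only [hb, Bool.false_eq_true, if_false, if_true]

lemma msat_top (gates : List (String × Int × Int × Int)) (n : Int)
    (f : PySem.Dict Int Int) (m : PySem.Dict (List Int) Bool) :
    (msatGo gates n f m).1 = ((altEnter gates n f m []).1, ((altEnter gates n f m []).2.size : Int)) := by
  rw [altEnter_eq_unwind gates n _ f m [] rfl]
  rw [altUnwind]
  exact Prod.ext rfl (msatGo_len gates n f m)

-- ===== VERDICT (by name: the statement is the Claim_ definition above) =====
theorem memoized_sat_spec : Claim_equal_memoized_sat := by
  intro gates n fixed_vars memo _
  unfold Spec_memoized_sat memoized_sat memoized_sat_alt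
  cases fixed_vars <;> cases memo <;> exact msat_top gates n _ _
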